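-- pv_equiv track=rewrite | github.com/E-P-T/Homework | UladzimirFiodarau/Task 4.6.py | get_shortest_word
-- ===== SOURCE A (Python) =====
-- def get_shortest_word(string: str) -> str:
--     """
--     Despite its name saying quite the opposite the function processes a string and returns the longest word in string
--     (punctuation symbols included). all whitespaces are ignored. If there are multiple longest words in
--     the string with a same length it returns the word that occurs first. If given an empty string the function returns
--     a message 'Empty string input'.
--     :param string: input string
--     :return: a string
--     :raises AssertionError if input is not string type
--     """
--     assert isinstance(string, str), 'Incorrect input. first argument must be a string'
--     words = string.split()
--     lengths_list = [len(i) for i in words]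
--     for i, length in enumerate(lengths_list):
--         if length == max(lengths_list):
--             return words[i]
--     return 'Empty string input'
-- ===== SOURCE B (Python) =====
-- def get_shortest_word(string: str) -> str:
--     assert isinstance(string, str), 'Incorrect input. first argument must be a string'
--     best_word = None
--     best_len = -1
--     for word in string.split():
--         if len(word) > best_len:
--             best_word = word
--             best_len = len(word)
--     return best_word if best_word is not None else 'Empty string input'
-- ===== Notes on version B (the rewrite author's own statement) =====
-- stated objective: alternative
-- what changed: Replaced A's lengths list plus a loop that recomputes max(lengths_list) on every iteration with a single accumulator pass keeping the first strictly-longest word seen.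
import Mathlib
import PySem

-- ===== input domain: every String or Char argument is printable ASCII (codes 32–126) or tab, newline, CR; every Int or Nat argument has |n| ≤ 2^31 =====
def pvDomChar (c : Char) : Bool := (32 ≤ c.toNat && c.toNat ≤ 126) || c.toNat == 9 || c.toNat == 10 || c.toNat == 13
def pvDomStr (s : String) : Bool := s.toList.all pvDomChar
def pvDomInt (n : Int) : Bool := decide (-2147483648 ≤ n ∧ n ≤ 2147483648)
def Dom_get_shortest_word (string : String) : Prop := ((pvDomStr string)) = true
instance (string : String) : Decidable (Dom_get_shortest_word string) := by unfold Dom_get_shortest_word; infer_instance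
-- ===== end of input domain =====

-- B replaces A's lengths list and per-iteration max() recomputation with one accumulator pass over the words (objective: alternative decomposition).

-- ===== PORT A =====
-- the early-returning for-loop over enumerate(lengths_list); inside the loop lengths_list is
-- nonempty, so max? is some there (the none branch is unreachable; recursing is a safe filler)
def pyLoopA (words : List String) (lengths_list : List Int) : List (Int × Int) → String
  | [] => "Empty string input"
  | (i, length) :: rest =>
      match PySem.List.max? lengths_list (fun y => y) with
      | some m =>
          if length = m then (PySem.List.pyGet? words i).getD "" else pyLoopA words lengths_list rest
      | none => pyLoopA words lengths_list rest

def get_shortest_word (string : String) : String :=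
  let words := PySem.Str.split₀ string
  let lengths_list := words.map PySem.Str.len
  pyLoopA words lengths_list (PySem.List.enumerate lengths_list)

-- ===== PORT B =====
def bStep (acc : Option String × Int) (word : String) : Option String × Int :=
  if PySem.Str.len word > acc.2 then (some word, PySem.Str.len word) else acc

def get_shortest_word_alt (string : String) : String :=
  let r := (PySem.Str.split₀ string).foldl bStep (none, -1)
  match r.1 with
  | some w => w
  | none => "Empty string input"

-- ===== PRECONDITION & SPEC =====
def Spec_get_shortest_word (string : String) (out : String) : Prop := out = get_shortest_word_alt string
instance (string : String) (out : String) : Decidable (Spec_get_shortest_word string out) := by unfold Spec_get_shortest_word; infer_instance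

-- ===== CLAIM (what is proved, stated in full; the proofs are below) =====
def Claim_equal_get_shortest_word : Prop := ∀ (string : String), Dom_get_shortest_word string → Spec_get_shortest_word string (get_shortest_word string)

-- ===== LEMMAS AND PROOFS =====

-- the first longest word, scanning left with a current best (B's accumulator, made explicit)
def bestFrom (b : String) : List String → String
  | [] => b
  | w :: ws => if PySem.Str.len w > PySem.Str.len b then bestFrom w ws else bestFrom b ws

theorem foldl_bStep_some (ws : List String) : ∀ (b : String),
    ws.foldl bStep (some b, PySem.Str.len b) =
      (some (bestFrom b ws), PySem.Str.len (bestFrom b ws)) := by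
  induction ws with
  | nil => intro b; simp [bestFrom]
  | cons w t ih =>
      intro b
      rw [List.foldl_cons,
        show bestFrom b (w :: t)
          = if PySem.Str.len w > PySem.Str.len b then bestFrom w t else bestFrom b t from rfl]
      by_cases h : PySem.Str.len w > PySem.Str.len b
      · rw [show bStep (some b, PySem.Str.len b) w = (some w, PySem.Str.len w) from by
          unfold bStep; rw [if_pos h], ih, if_pos h]
      · rw [show bStep (some b, PySem.Str.len b) w = (some b, PySem.Str.len b) from by
          unfold bStep; rw [if_neg h], ih, if_neg h]

theorem find?_eq_bestFrom (t : List String) : ∀ (w : String),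
    List.find? (fun v => PySem.Str.len v == List.foldl max (PySem.Str.len w) (t.map PySem.Str.len)) (w :: t)
      = some (bestFrom w t) := by
  induction t with
  | nil =>
      intro w
      rw [show bestFrom w [] = w from rfl]
      simp
  | cons v t' ih =>
      intro w
      have hfold : List.foldl max (PySem.Str.len w) ((v :: t').map PySem.Str.len)
          = List.foldl max (max (PySem.Str.len w) (PySem.Str.len v)) (t'.map PySem.Str.len) := by
        simp
      rw [show bestFrom w (v :: t')
          = if PySem.Str.len v > PySem.Str.len w then bestFrom v t' else bestFrom w t' from rfl]
      by_cases h : PySem.Str.len v > PySem.Str.len w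
      · have hmax : max (PySem.Str.len w) (PySem.Str.len v) = PySem.Str.len v := by omega
        have hge := (PySem.List.le_foldl_max (t'.map PySem.Str.len) (PySem.Str.len v)).1
        have hw : ((fun u => PySem.Str.len u
            == List.foldl max (PySem.Str.len w) ((v :: t').map PySem.Str.len)) w) = false := by
          rw [hfold, hmax]
          simp only [beq_eq_false_iff_ne, ne_eq]
          omega
        rw [List.find?_cons_of_neg (by simp only [hw, Bool.false_eq_true, not_false_eq_true]), if_pos h, hfold, hmax]
        exact ih v
      · have hmax : max (PySem.Str.len w) (PySem.Str.len v) = PySem.Str.len w := by omega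
        have hge := (PySem.List.le_foldl_max (t'.map PySem.Str.len) (PySem.Str.len w)).1
        rw [if_neg h, hfold, hmax]
        by_cases hw : PySem.Str.len w = List.foldl max (PySem.Str.len w) (t'.map PySem.Str.len)
        · rw [List.find?_cons_of_pos (by simpa using hw)]
          have := ih w
          rw [List.find?_cons_of_pos (by simpa using hw)] at this
          exact this
        · rw [List.find?_cons_of_neg (by simpa using hw),
            List.find?_cons_of_neg (by simp only [beq_iff_eq]; omega)]
          have := ih w
          rw [List.find?_cons_of_neg (by simpa using hw)] at this
          exact this

theorem loopA_eq_find? (d : List String) : ∀ (k : Nat) (words : List String) (m : Int),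
    words.drop k = d →
    PySem.List.max? (words.map PySem.Str.len) (fun y => y) = some m →
    pyLoopA words (words.map PySem.Str.len)
        (PySem.List.enumerate ((words.map PySem.Str.len).drop k) (k : Int)) =
      (match List.find? (fun v => PySem.Str.len v == m) d with
        | some w => w
        | none => "Empty string input") := by
  induction d with
  | nil =>
      intro k words m hd hm
      have h0 : (words.map PySem.Str.len).drop k = [] := by
        rw [← List.map_drop, hd]; rfl
      rw [h0]
      simp [PySem.List.enumerate, pyLoopA]
  | cons w d' ih =>
      intro k words m hd hm
      have hk : k < words.length := by
        rcases Nat.lt_or_ge k words.length with h | h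
        · exact h
        · rw [List.drop_eq_nil_of_le h] at hd; simp at hd
      have hcc : words[k] :: words.drop (k + 1) = w :: d' := by
        rw [← List.drop_eq_getElem_cons hk, hd]
      obtain ⟨hkw, hd'⟩ := List.cons_eq_cons.mp hcc
      have hdrop : (words.map PySem.Str.len).drop k
          = PySem.Str.len w :: (words.map PySem.Str.len).drop (k + 1) := by
        rw [← List.map_drop, hd, ← List.map_drop, hd']; rfl
      rw [hdrop, PySem.List.enumerate_cons]
      by_cases h : PySem.Str.len w = m
      · have hget : PySem.List.pyGet? words (k : Int) = some w := by
          rw [PySem.List.pyGet?_natCast, List.getElem?_eq_getElem hk, hkw]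
        rw [List.find?_cons_of_pos (by simpa using h)]
        simp only [pyLoopA, hm, if_pos h, hget, Option.getD_some]
      · rw [List.find?_cons_of_neg (by simpa using h)]
        have hcast : ((k : Int) + 1) = ((k + 1 : Nat) : Int) := by push_cast; ring
        have := ih (k + 1) words m hd' hm
        simp only [pyLoopA, hm, if_neg h, hcast]
        exact this

theorem main_eq (string : String) :
    get_shortest_word string = get_shortest_word_alt string := by
  unfold get_shortest_word get_shortest_word_alt
  cases hws : PySem.Str.split₀ string with
  | nil => simp [PySem.List.enumerate, pyLoopA]
  | cons w t =>
      have hm : PySem.List.max? ((w :: t).map PySem.Str.len) (fun y => y)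
          = some (List.foldl max (PySem.Str.len w) (t.map PySem.Str.len)) := by
        simpa using PySem.List.max?_id_cons (PySem.Str.len w) (t.map PySem.Str.len)
      have hA := loopA_eq_find? (w :: t) 0 (w :: t)
        (List.foldl max (PySem.Str.len w) (t.map PySem.Str.len)) rfl hm
      simp only [List.drop_zero, Int.natCast_zero] at hA
      rw [hA, find?_eq_bestFrom]
      -- B side: the first word always beats the initial -1
      have hpos : PySem.Str.len w > (-1 : Int) := by
        rw [PySem.Str.len_eq]; omega
      simp only [List.foldl_cons, bStep, hpos, if_pos]
      rw [foldl_bStep_some]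

-- ===== VERDICT (by name: the statement is the Claim_ definition above) =====
theorem get_shortest_word_spec : Claim_equal_get_shortest_word := by
  intro string _
  unfold Spec_get_shortest_word
  exact main_eq string
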